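-- pv_equiv track=rewrite | github.com/Logancreator/Tool-Box | readFaAddN.py | getGapPos
-- ===== SOURCE A (Python) =====
-- def getGapPos(sequence):
--     '''
--     @msg: 获取某条序列中gap的位置
--     @param sequence {str}  一段DNA序列
--     @return: {list}  返回一个列表，列表中每个元素为每个gap的起始和结束位置
--     '''
--     Ns = {'N', 'n'}
--     result = []
--     i = 0
--     for base in sequence:
--         i += 1
--         if not base in Ns: continue
--         if len(result) == 0 : result.append([i,i])
--         elif i - result[-1][1] == 1: result[-1][1] = i
--         else: result.append([i,i])
--     return result
-- ===== SOURCE B (Python) =====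
-- def getGapPos(sequence):
--     isn = [c in 'Nn' for c in sequence]
--     starts = [i for i, (prev, cur) in enumerate(zip([False] + isn, isn), 1) if cur and not prev]
--     ends = [i for i, (cur, nxt) in enumerate(zip(isn, isn[1:] + [False]), 1) if cur and not nxt]
--     return [[s, e] for s, e in zip(starts, ends)]
-- ===== Notes on version B (the rewrite author's own statement) =====
-- stated objective: alternative
-- what changed: B works in staged passes over a boolean N-mask: it collects the run starts (an N whose predecessor is not N) and run ends (an N whose successor is not N) as two separate boundary lists via shifted zips, then zips them into intervals, instead of A's single stateful loop that appends or extends the last interval by comparing the index to its end.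
import Mathlib
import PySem

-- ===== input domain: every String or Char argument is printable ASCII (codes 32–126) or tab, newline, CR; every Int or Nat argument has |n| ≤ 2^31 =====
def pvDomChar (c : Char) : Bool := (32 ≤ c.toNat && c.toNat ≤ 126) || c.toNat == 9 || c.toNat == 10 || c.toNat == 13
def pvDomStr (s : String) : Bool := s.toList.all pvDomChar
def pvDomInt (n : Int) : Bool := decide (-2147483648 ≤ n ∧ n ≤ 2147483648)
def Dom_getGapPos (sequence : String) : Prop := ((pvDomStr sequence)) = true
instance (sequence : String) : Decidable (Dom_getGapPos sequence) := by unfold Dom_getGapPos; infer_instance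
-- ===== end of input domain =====

-- B replaces A's stateful append-or-extend loop by staged boundary passes: an N-mask, the lists of
-- run starts and run ends found by shifted zips, zipped into intervals. Same cost, different
-- decomposition; return values proved equal on all inputs.

-- ===== PORT A =====
-- membership test `base in {'N','n'}`
def pvIsN (c : Char) : Bool := c == 'N' || c == 'n'

-- A's loop: `res` holds `result` with most-recent interval FIRST (Python appends at the end),
-- reversed on return; `i` is the running 1-based position counter.
def getGapPosLoopA : List Char → Int → List (List Int) → List (List Int)
  | [], _, res => res.reverse
  | base :: rest, i, res =>
    let i' := i + 1
    if ¬ (pvIsN base) then getGapPosLoopA rest i' res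
    else match res with
      | [] => getGapPosLoopA rest i' [[i', i']]
      | (s :: e :: t) :: prev =>
        if i' - e == 1 then getGapPosLoopA rest i' ((s :: i' :: t) :: prev)   -- result[-1][1] = i
        else getGapPosLoopA rest i' ([i', i'] :: (s :: e :: t) :: prev)
      | bad :: prev => getGapPosLoopA rest i' ([i', i'] :: bad :: prev)      -- unreachable: entries always have 2 elements

def getGapPos (sequence : String) : List (List Int) :=
  getGapPosLoopA sequence.toList 0 []

-- ===== PORT B =====
-- Source B's start comprehension: loop over enumerate(zip([False]+isn, isn), 1), keep i if cur and not prev.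
def pvStarts : List (Bool × Bool) → Int → List Int
  | [], _ => []
  | (prev, cur) :: rest, i => (if cur && !prev then [i] else []) ++ pvStarts rest (i + 1)

-- Source B's end comprehension: loop over enumerate(zip(isn, isn[1:]+[False]), 1), keep i if cur and not nxt.
def pvEnds : List (Bool × Bool) → Int → List Int
  | [], _ => []
  | (cur, nxt) :: rest, i => (if cur && !nxt then [i] else []) ++ pvEnds rest (i + 1)

def getGapPos_alt (sequence : String) : List (List Int) :=
  let isn := sequence.toList.map pvIsN
  let starts := pvStarts ((false :: isn).zip isn) 1
  let ends := pvEnds (isn.zip (isn.drop 1 ++ [false])) 1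
  (starts.zip ends).map (fun p => [p.1, p.2])

-- ===== PRECONDITION & SPEC =====
def Spec_getGapPos (sequence : String) (out : List (List Int)) : Prop := out = getGapPos_alt sequence
instance (sequence : String) (out : List (List Int)) : Decidable (Spec_getGapPos sequence out) := by unfold Spec_getGapPos; infer_instance

-- ===== CLAIM (what is proved, stated in full; the proofs are below) =====
def Claim_equal_getGapPos : Prop := ∀ (sequence : String), Dom_getGapPos sequence → Spec_getGapPos sequence (getGapPos sequence)

-- ===== LEMMAS AND PROOFS =====

-- "Merge or open": given intervals L whose first interval may start at p+1, either extend the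
-- pending interval [s, p] through it or close [s, p] and keep L.
def pvMH (s p : Int) : List (List Int) → List (List Int)
  | (a :: b) :: r => if a = p + 1 then (s :: b) :: r else [s, p] :: (a :: b) :: r
  | L => [s, p] :: L

-- Character-by-character reference: at an N at position i+1, merge/open against the rest's intervals.
def pvSpecG : List Char → Int → List (List Int)
  | [], _ => []
  | c :: rest, i =>
    if pvIsN c then pvMH (i + 1) (i + 1) (pvSpecG rest (i + 1)) else pvSpecG rest (i + 1)

-- the same reference over the boolean mask
def pvSpecB : List Bool → Int → List (List Int)
  | [], _ => []
  | b :: rest, i =>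
    if b then pvMH (i + 1) (i + 1) (pvSpecB rest (i + 1)) else pvSpecB rest (i + 1)

theorem pvSpecB_map (cs : List Char) : ∀ i, pvSpecB (cs.map pvIsN) i = pvSpecG cs i := by
  induction cs with
  | nil => intro i; rfl
  | cons c rest ih => intro i; simp [pvSpecB, pvSpecG, ih]

theorem pvMH_MH (s i : Int) (L : List (List Int)) :
    pvMH s i (pvMH (i + 1) (i + 1) L) = pvMH s (i + 1) L := by
  match L with
  | [] => simp [pvMH]
  | [] :: r => simp [pvMH]
  | (a :: b) :: r =>
    by_cases h : a = i + 1 + 1 <;> simp [pvMH, h]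

theorem pvSpecB_start (l : List Bool) (j a : Int) (b : List Int) (r : List (List Int))
    (h : pvSpecB l j = (a :: b) :: r) : j + 1 ≤ a := by
  induction l generalizing j a b r with
  | nil => simp [pvSpecB] at h
  | cons c rest ih =>
    simp only [pvSpecB] at h
    by_cases hc : c = true
    · rw [if_pos hc] at h
      match hL : pvSpecB rest (j + 1) with
      | [] => rw [hL] at h; simp [pvMH] at h; omega
      | [] :: r' => rw [hL] at h; simp [pvMH] at h; omega
      | (a' :: b') :: r' =>
        rw [hL] at h
        by_cases ha : a' = j + 1 + 1 <;> simp [pvMH, ha] at h <;> omega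
    · rw [if_neg hc] at h
      have := ih (j + 1) a b r h
      omega

theorem pvSpecG_start (cs : List Char) (j a : Int) (b : List Int) (r : List (List Int))
    (h : pvSpecG cs j = (a :: b) :: r) : j + 1 ≤ a := by
  apply pvSpecB_start (cs.map pvIsN) j a b r
  rw [pvSpecB_map]; exact h

-- A's loop equals the reference, under the three reachable accumulator shapes.
theorem pvLoopA_spec (cs : List Char) :
    (∀ i, getGapPosLoopA cs i [] = pvSpecG cs i) ∧
    (∀ i s prev, getGapPosLoopA cs i ([s, i] :: prev) =
        prev.reverse ++ pvMH s i (pvSpecG cs i)) ∧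
    (∀ i s e prev, e < i → getGapPosLoopA cs i ([s, e] :: prev) =
        ([s, e] :: prev).reverse ++ pvSpecG cs i) := by
  induction cs with
  | nil =>
    refine ⟨fun i => rfl, fun i s prev => ?_, fun i s e prev _ => ?_⟩ <;>
      simp [getGapPosLoopA, pvSpecG, pvMH]
  | cons c rest ih =>
    obtain ⟨ihP, ihQ, ihR⟩ := ih
    by_cases hc : pvIsN c
    · refine ⟨fun i => ?_, fun i s prev => ?_, fun i s e prev he => ?_⟩
      · -- empty accumulator, N char: open [i+1, i+1]
        simp only [getGapPosLoopA, hc, not_true_eq_false, if_false]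
        rw [ihQ (i + 1) (i + 1) []]
        simp [pvSpecG, hc]
      · -- head ends at i, N char: extend it to i+1
        have hcond : (i + 1 - i == (1 : Int)) = true := by simp
        simp only [getGapPosLoopA, hc, not_true_eq_false, if_false, hcond, if_true]
        rw [ihQ (i + 1) s prev]
        simp [pvSpecG, hc, pvMH_MH]
      · -- head ends before i, N char: open a new interval
        have hcond : (i + 1 - e == (1 : Int)) = false := by simp; omega
        simp only [getGapPosLoopA, hc, not_true_eq_false, if_false, hcond, Bool.false_eq_true,
          if_false]
        rw [ihQ (i + 1) (i + 1) ([s, e] :: prev)]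
        simp [pvSpecG, hc]
    · refine ⟨fun i => ?_, fun i s prev => ?_, fun i s e prev he => ?_⟩
      · simp only [getGapPosLoopA, hc, not_false_eq_true, if_true]
        rw [ihP (i + 1)]
        simp [pvSpecG, hc]
      · -- head ends at i, non-N char: head becomes stale (e < i+1)
        simp only [getGapPosLoopA, hc, not_false_eq_true, if_true]
        rw [ihR (i + 1) s i prev (by omega)]
        have hmh : pvMH s i (pvSpecG rest (i + 1)) = [s, i] :: pvSpecG rest (i + 1) := by
          match hL : pvSpecG rest (i + 1) with
          | [] => simp [pvMH]
          | [] :: r' => simp [pvMH]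
          | (a :: b) :: r' =>
            have := pvSpecG_start rest (i + 1) a b r' hL
            simp [pvMH]; omega
        simp [pvSpecG, hc, hmh]
      · simp only [getGapPosLoopA, hc, not_false_eq_true, if_true]
        rw [ihR (i + 1) s e prev (by omega)]
        simp [pvSpecG, hc]

-- starts are insensitive to the recorded previous value when the current run is not an N-run
theorem pvStarts_prev (t : List Bool) (p q : Bool) (j : Int) (h : t.headD false = false) :
    pvStarts ((p :: t).zip t) j = pvStarts ((q :: t).zip t) j := by
  match t with
  | [] => rfl
  | b :: t' =>
    simp at h
    simp [pvStarts, h]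

-- zip-shape unfolding for the ends pass
theorem pvEnds_cons (b : Bool) (t : List Bool) (j : Int) :
    pvEnds ((b :: t).zip ((b :: t).drop 1 ++ [false])) j
      = (if b && !(t.headD false) then [j] else []) ++ pvEnds (t.zip (t.drop 1 ++ [false])) (j + 1) := by
  match t with
  | [] => simp [pvEnds]
  | c :: t' => simp [pvEnds]

-- when the next run is not an N-run, the pending interval closes: pvMH cannot merge
theorem pvMH_noMerge (t : List Bool) (s p i : Int) (hp : p ≤ i + 1) (h : t.headD false = false) :
    pvMH s p (pvSpecB t (i + 1)) = [s, p] :: pvSpecB t (i + 1) := by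
  match t with
  | [] => simp [pvSpecB, pvMH]
  | c :: t' =>
    have hc : c = false := by simpa using h
    subst hc
    have hB : pvSpecB (false :: t') (i + 1) = pvSpecB t' (i + 1 + 1) := by simp [pvSpecB]
    rw [hB]
    match hL : pvSpecB t' (i + 1 + 1) with
    | [] => simp [pvMH]
    | [] :: r => simp [pvMH]
    | (a :: b) :: r =>
      have := pvSpecB_start t' (i + 1 + 1) a b r hL
      simp [pvMH]; omega

-- B's staged passes equal the reference: zipping start and end boundary lists reconstructs the intervals.
theorem pvPasses_spec (l : List Bool) :
    (∀ i : Int, ((pvStarts ((false :: l).zip l) (i + 1)).zip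
        (pvEnds (l.zip (l.drop 1 ++ [false])) (i + 1))).map (fun p => [p.1, p.2]) = pvSpecB l i) ∧
    (∀ i s : Int, l.headD false = true →
      ((s :: pvStarts ((true :: l).zip l) (i + 1)).zip
        (pvEnds (l.zip (l.drop 1 ++ [false])) (i + 1))).map (fun p => [p.1, p.2])
        = pvMH s i (pvSpecB l i)) := by
  induction l with
  | nil => exact ⟨fun i => rfl, fun i s h => by simp at h⟩
  | cons b t ih =>
    obtain ⟨ihP, ihQ⟩ := ih
    constructor
    · intro i
      rw [pvEnds_cons]
      by_cases hb : b = true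
      · subst hb
        by_cases ht : t.headD false = true
        · -- N continuing into t: start emitted, no end yet
          simp only [pvStarts, List.zip_cons_cons, Bool.not_false, Bool.and_self, if_true, ht,
            Bool.not_true, Bool.and_false, Bool.false_eq_true, if_false, List.nil_append,
            List.singleton_append]
          rw [ihQ (i + 1) (i + 1) ht]
          simp [pvSpecB]
        · -- isolated N (next not N): start and end both emitted here
          have ht' : t.headD false = false := by simpa using ht
          simp only [pvStarts, List.zip_cons_cons, Bool.not_false, Bool.and_self, if_true, ht',
            Bool.true_and, List.singleton_append, List.zip_cons_cons, List.map_cons]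
          rw [pvStarts_prev t true false (i + 1 + 1) ht', ihP (i + 1)]
          rw [show pvSpecB (true :: t) i = pvMH (i + 1) (i + 1) (pvSpecB t (i + 1)) from by
            simp [pvSpecB]]
          rw [pvMH_noMerge t (i + 1) (i + 1) i le_rfl ht']
      · -- not an N: nothing emitted, position advances
        have hb' : b = false := by simpa using hb
        subst hb'
        simp only [pvStarts, List.zip_cons_cons, Bool.false_and, Bool.false_eq_true, if_false,
          List.nil_append]
        rw [ihP (i + 1)]
        simp [pvSpecB]
    · intro i s hl
      have hb : b = true := by simpa using hl
      subst hb
      rw [pvEnds_cons]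
      by_cases ht : t.headD false = true
      · -- run continues: neither a start nor an end here
        simp only [pvStarts, List.zip_cons_cons, Bool.not_true, Bool.and_false, ht,
          Bool.false_eq_true, if_false, List.nil_append, Bool.true_and]
        rw [ihQ (i + 1) s ht]
        rw [show pvSpecB (true :: t) i = pvMH (i + 1) (i + 1) (pvSpecB t (i + 1)) from by
          simp [pvSpecB]]
        rw [pvMH_MH]
      · -- run ends here: close the pending interval [s, i+1]
        have ht' : t.headD false = false := by simpa using ht
        simp only [pvStarts, List.zip_cons_cons, Bool.not_true, Bool.and_false, ht',
          Bool.false_eq_true, if_false, Bool.not_false, Bool.true_and, if_true,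
          List.nil_append, List.singleton_append, List.zip_cons_cons, List.map_cons]
        rw [pvStarts_prev t true false (i + 1 + 1) ht', ihP (i + 1)]
        rw [show pvSpecB (true :: t) i = pvMH (i + 1) (i + 1) (pvSpecB t (i + 1)) from by
          simp [pvSpecB]]
        rw [pvMH_MH, pvMH_noMerge t s (i + 1) i le_rfl ht']

-- ===== VERDICT (by name: the statement is the Claim_ definition above) =====
theorem getGapPos_spec : Claim_equal_getGapPos := by
  intro sequence _
  unfold Spec_getGapPos getGapPos getGapPos_alt
  rw [(pvLoopA_spec sequence.toList).1 0]
  have := (pvPasses_spec (sequence.toList.map pvIsN)).1 0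
  rw [pvSpecB_map] at this
  simpa using this.symm
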